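-- pv_equiv track=rewrite | github.com/ShuoZheLi/verl | value_decoding/chunk_ranking_benchmark.py | _prefix_bucket_indices
-- ===== SOURCE A (Python) =====
-- import math
--
-- PREFIX_BUCKETS = ("early", "middle", "late")
--
-- def _prefix_bucket_indices(num_generated_tokens: int) -> dict[str, list[int]]:
--     if num_generated_tokens <= 0:
--         return {bucket: [] for bucket in PREFIX_BUCKETS}
--
--     indices = list(range(num_generated_tokens))
--     early_end = int(math.ceil(num_generated_tokens * 0.25))
--     middle_end = int(math.ceil(num_generated_tokens * 0.75))
--     return {
--         "early": indices[:early_end],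
--         "middle": indices[early_end:middle_end],
--         "late": indices[middle_end:],
--     }
-- ===== SOURCE B (Python) =====
-- def _prefix_bucket_indices(num_generated_tokens: int) -> dict[str, list[int]]:
--     early_end = (num_generated_tokens + 3) // 4
--     middle_end = (3 * num_generated_tokens + 3) // 4
--     buckets = {"early": [], "middle": [], "late": []}
--     for i in range(num_generated_tokens):
--         if i < early_end:
--             buckets["early"].append(i)
--         elif i < middle_end:
--             buckets["middle"].append(i)
--         else:
--             buckets["late"].append(i)
--     return buckets
-- ===== Notes on version B (the rewrite author's own statement) =====
-- stated objective: alternative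
-- what changed: Replaces list(range)+float math.ceil thresholds+three slices by a single branching pass over range(n) that appends each index to its bucket using exact integer ceiling thresholds (n+3)//4 and (3n+3)//4.
import Mathlib
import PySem

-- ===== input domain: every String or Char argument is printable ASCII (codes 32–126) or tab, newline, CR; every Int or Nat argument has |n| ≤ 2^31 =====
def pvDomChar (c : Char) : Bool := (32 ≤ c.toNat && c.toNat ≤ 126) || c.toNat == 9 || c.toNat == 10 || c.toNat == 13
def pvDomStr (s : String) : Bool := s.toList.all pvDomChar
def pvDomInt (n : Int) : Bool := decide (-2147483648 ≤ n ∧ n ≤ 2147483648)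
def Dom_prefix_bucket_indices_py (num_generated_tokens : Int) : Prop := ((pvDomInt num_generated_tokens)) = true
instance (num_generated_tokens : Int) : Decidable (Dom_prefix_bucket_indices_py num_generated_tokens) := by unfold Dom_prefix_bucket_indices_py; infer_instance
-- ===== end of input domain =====

-- B replaces A's slicing of list(range(n)) at float-ceil cut points by one branching pass with
-- integer-ceiling thresholds; same cost, different decomposition (objective: alternative).

-- ===== PORT A =====
-- int(math.ceil(n * 0.25)) and int(math.ceil(n * 0.75)): for 0 < n ≤ 2^31 the doubles n*0.25 and
-- n*0.75 are exactly representable, so the float ceil equals the integer ceiling -((-n) // 4),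
-- -((-(3*n)) // 4); exact on the stated domain.
def prefix_bucket_indices_py (num_generated_tokens : Int) : List (String × List Int) :=
  if num_generated_tokens ≤ 0 then
    [("early", []), ("middle", []), ("late", [])]
  else
    let indices := PySem.List.pyRange 0 num_generated_tokens 1
    let early_end := -(PySem.Int.floordiv (-num_generated_tokens) 4)
    let middle_end := -(PySem.Int.floordiv (-(3 * num_generated_tokens)) 4)
    [("early", PySem.List.slice indices none (some early_end)),
     ("middle", PySem.List.slice indices (some early_end) (some middle_end)),
     ("late", PySem.List.slice indices (some middle_end) none)]

-- ===== PORT B =====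
-- loop body of Source B: append i to the bucket selected by the two thresholds
def pvAltStep (early_end middle_end : Int) (acc : List Int × List Int × List Int) (i : Int) :
    List Int × List Int × List Int :=
  if i < early_end then (acc.1 ++ [i], acc.2.1, acc.2.2)
  else if i < middle_end then (acc.1, acc.2.1 ++ [i], acc.2.2)
  else (acc.1, acc.2.1, acc.2.2 ++ [i])

def prefix_bucket_indices_py_alt (num_generated_tokens : Int) : List (String × List Int) :=
  let early_end := PySem.Int.floordiv (num_generated_tokens + 3) 4
  let middle_end := PySem.Int.floordiv (3 * num_generated_tokens + 3) 4
  let r := (PySem.List.pyRange 0 num_generated_tokens 1).foldl (pvAltStep early_end middle_end) ([], [], [])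
  [("early", r.1), ("middle", r.2.1), ("late", r.2.2)]

-- ===== PRECONDITION & SPEC =====
def Spec_prefix_bucket_indices_py (num_generated_tokens : Int) (out : List (String × List Int)) : Prop := out = prefix_bucket_indices_py_alt num_generated_tokens
instance (num_generated_tokens : Int) (out : List (String × List Int)) : Decidable (Spec_prefix_bucket_indices_py num_generated_tokens out) := by unfold Spec_prefix_bucket_indices_py; infer_instance

-- ===== CLAIM (what is proved, stated in full; the proofs are below) =====
def Claim_equal_prefix_bucket_indices_py : Prop := ∀ (num_generated_tokens : Int), Dom_prefix_bucket_indices_py num_generated_tokens → Spec_prefix_bucket_indices_py num_generated_tokens (prefix_bucket_indices_py num_generated_tokens)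

-- ===== LEMMAS AND PROOFS =====

-- a run of indices all below early_end lands entirely in the early bucket
theorem pvFoldl_early (a b : Int) (xs : List Int) (h : ∀ x ∈ xs, x < a) :
    ∀ e m l : List Int, xs.foldl (pvAltStep a b) (e, m, l) = (e ++ xs, m, l) := by
  induction xs with
  | nil => intro e m l; simp
  | cons x xs ih =>
    intro e m l
    have hx : x < a := h x (by simp)
    simp only [List.foldl_cons, pvAltStep, if_pos hx]
    rw [ih (fun y hy => h y (by simp [hy]))]
    simp

-- a run of indices in [a, b) lands entirely in the middle bucket
theorem pvFoldl_middle (a b : Int) (xs : List Int) (h : ∀ x ∈ xs, a ≤ x ∧ x < b) :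
    ∀ e m l : List Int, xs.foldl (pvAltStep a b) (e, m, l) = (e, m ++ xs, l) := by
  induction xs with
  | nil => intro e m l; simp
  | cons x xs ih =>
    intro e m l
    obtain ⟨hx1, hx2⟩ := h x (by simp)
    simp only [List.foldl_cons, pvAltStep, if_neg (by omega : ¬ x < a), if_pos hx2]
    rw [ih (fun y hy => h y (by simp [hy]))]
    simp

-- a run of indices ≥ b lands entirely in the late bucket
theorem pvFoldl_late (a b : Int) (xs : List Int) (h : ∀ x ∈ xs, b ≤ x) (hab : a ≤ b) :
    ∀ e m l : List Int, xs.foldl (pvAltStep a b) (e, m, l) = (e, m, l ++ xs) := by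
  induction xs with
  | nil => intro e m l; simp
  | cons x xs ih =>
    intro e m l
    have hx : b ≤ x := h x (by simp)
    simp only [List.foldl_cons, pvAltStep, if_neg (by omega : ¬ x < a), if_neg (by omega : ¬ x < b)]
    rw [ih (fun y hy => h y (by simp [hy]))]
    simp

-- ===== VERDICT (by name: the statement is the Claim_ definition above) =====
theorem prefix_bucket_indices_py_spec : Claim_equal_prefix_bucket_indices_py := by
  intro n _
  unfold Spec_prefix_bucket_indices_py prefix_bucket_indices_py prefix_bucket_indices_py_alt
  by_cases hn : n ≤ 0
  · rw [if_pos hn, PySem.List.pyRange_one_eq_nil hn]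
    simp
  · rw [if_neg hn]
    push Not at hn
    -- the two threshold computations agree
    have h4 : (0:Int) < 4 := by norm_num
    rw [PySem.Int.floordiv_eq_ediv_of_pos h4, PySem.Int.floordiv_eq_ediv_of_pos h4,
        PySem.Int.floordiv_eq_ediv_of_pos h4, PySem.Int.floordiv_eq_ediv_of_pos h4]
    set a : Int := (n + 3) / 4 with ha
    set b : Int := (3 * n + 3) / 4 with hb
    have hea : -(-n / 4) = a := by omega
    have heb : -(-(3 * n) / 4) = b := by omega
    rw [hea, heb]
    have h0a : (0:Int) ≤ a := by omega
    have hab : a ≤ b := by omega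
    have hbn : b ≤ n := by omega
    have hsplit : PySem.List.pyRange 0 n 1 =
        PySem.List.pyRange 0 a 1 ++ (PySem.List.pyRange a b 1 ++ PySem.List.pyRange b n 1) := by
      rw [← PySem.List.pyRange_one_append a b n hab hbn,
          ← PySem.List.pyRange_one_append 0 a n h0a (by omega)]
    have hlen1 : (PySem.List.pyRange 0 a 1).length = a.toNat := by
      rw [PySem.List.length_pyRange_one]; omega
    have hlen2 : (PySem.List.pyRange a b 1).length = b.toNat - a.toNat := by
      rw [PySem.List.length_pyRange_one]; omega
    -- A's slices are the three subranges
    have hA1 : PySem.List.slice (PySem.List.pyRange 0 n 1) none (some a) =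
        PySem.List.pyRange 0 a 1 := by
      rw [PySem.List.slice_to _ h0a, hsplit, ← hlen1, List.take_left]
    have hA2 : PySem.List.slice (PySem.List.pyRange 0 n 1) (some a) (some b) =
        PySem.List.pyRange a b 1 := by
      rw [PySem.List.slice_toNat _ h0a (by omega), hsplit, List.drop_left' hlen1, ← hlen2,
          List.take_left]
    have hA3 : PySem.List.slice (PySem.List.pyRange 0 n 1) (some b) none =
        PySem.List.pyRange b n 1 := by
      rw [PySem.List.slice_from _ (by omega), hsplit, ← List.append_assoc]
      rw [List.drop_left' (by rw [List.length_append, hlen1, hlen2]; omega)]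
    -- B's fold distributes the three subranges into the three buckets
    have hB : (PySem.List.pyRange 0 n 1).foldl (pvAltStep a b) ([], [], []) =
        (PySem.List.pyRange 0 a 1, PySem.List.pyRange a b 1, PySem.List.pyRange b n 1) := by
      rw [hsplit, List.foldl_append, List.foldl_append]
      rw [pvFoldl_early a b _ (fun x hx => ((PySem.List.mem_pyRange_one).1 hx).2)]
      rw [pvFoldl_middle a b _ (fun x hx => ⟨((PySem.List.mem_pyRange_one).1 hx).1,
            ((PySem.List.mem_pyRange_one).1 hx).2⟩)]
      rw [pvFoldl_late a b _ (fun x hx => ((PySem.List.mem_pyRange_one).1 hx).1) hab]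
      simp
    simp only [hB, hA1, hA2, hA3]
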